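-- pv_equiv track=rewrite | github.com/lukeeterna/fluxion-desktop | voice-agent/tests/test_nlu_vertical_integration.py | _extract_vertical_key_impl
-- ===== SOURCE A (Python) =====
-- def _extract_vertical_key_impl(verticale_id: str) -> str:
--     """Standalone implementation of orchestrator._extract_vertical_key for testing."""
--     NEW_VERTICALS = ["hair", "beauty", "wellness", "medico", "professionale"]
--     LEGACY_VERTICALS = ["salone", "palestra", "medical", "auto", "altro"]
--     verticale_lower = verticale_id.lower().strip()
--     all_keys = NEW_VERTICALS + LEGACY_VERTICALS
--     if verticale_lower in all_keys:
--         return verticale_lower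
--     for v in NEW_VERTICALS + LEGACY_VERTICALS:
--         if verticale_lower.startswith(v + "_") or verticale_lower.startswith(v + "-"):
--             return v
--     for v in NEW_VERTICALS + LEGACY_VERTICALS:
--         if verticale_lower.startswith(v):
--             return v
--     return "altro"
-- ===== SOURCE B (Python) =====
-- def _extract_vertical_key_impl(verticale_id: str) -> str:
--     """Single prefix scan: since no canonical key is a prefix of another, the
--     exact-match check and the separator-prefix pass of the original collapse
--     into one startswith test per key, in the same key order."""
--     NEW_VERTICALS = ["hair", "beauty", "wellness", "medico", "professionale"]
--     LEGACY_VERTICALS = ["salone", "palestra", "medical", "auto", "altro"]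
--     verticale_lower = verticale_id.lower().strip()
--     for v in NEW_VERTICALS + LEGACY_VERTICALS:
--         if verticale_lower.startswith(v):
--             return v
--     return "altro"
-- ===== Notes on version B (the rewrite author's own statement) =====
-- stated objective: simpler
-- what changed: Replaced A's three separate scans (exact membership in all_keys, then a separator-prefix loop, then a bare-prefix loop) with a single startswith pass over the same key order, correct because no key is a prefix of another key.
import Mathlib
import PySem

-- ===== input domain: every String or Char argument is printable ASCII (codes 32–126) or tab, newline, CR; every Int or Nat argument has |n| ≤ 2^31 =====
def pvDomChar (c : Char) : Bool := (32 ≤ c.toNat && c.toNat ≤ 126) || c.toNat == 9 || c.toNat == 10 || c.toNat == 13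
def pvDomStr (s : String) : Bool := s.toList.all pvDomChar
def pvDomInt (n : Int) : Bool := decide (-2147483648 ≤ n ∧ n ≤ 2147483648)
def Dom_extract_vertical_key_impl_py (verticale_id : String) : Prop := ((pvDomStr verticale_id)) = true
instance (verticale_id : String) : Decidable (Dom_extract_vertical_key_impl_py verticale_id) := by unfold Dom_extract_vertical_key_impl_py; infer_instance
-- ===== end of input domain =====

-- B replaces A's three separate scans (exact membership, separator-prefix loop, bare-prefix loop)
-- with ONE startswith pass over the same key order — simpler; equal because no key is a prefix of another.


-- ===== PORT A =====
def pvNEW_VERTICALS : List String := ["hair", "beauty", "wellness", "medico", "professionale"]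
def pvLEGACY_VERTICALS : List String := ["salone", "palestra", "medical", "auto", "altro"]

def extract_vertical_key_impl_py (verticale_id : String) : String :=
  let verticale_lower := PySem.Str.strip (PySem.Str.lower verticale_id)
  let all_keys := pvNEW_VERTICALS ++ pvLEGACY_VERTICALS
  if all_keys.contains verticale_lower then verticale_lower
  else
    match (pvNEW_VERTICALS ++ pvLEGACY_VERTICALS).find?
        (fun v => PySem.Str.startswith verticale_lower (v ++ "_")
               || PySem.Str.startswith verticale_lower (v ++ "-")) with
    | some v => v
    | none =>
      match (pvNEW_VERTICALS ++ pvLEGACY_VERTICALS).find?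
          (fun v => PySem.Str.startswith verticale_lower v) with
      | some v => v
      | none => "altro"

-- ===== PORT B =====
def extract_vertical_key_impl_py_alt (verticale_id : String) : String :=
  let verticale_lower := PySem.Str.strip (PySem.Str.lower verticale_id)
  match (pvNEW_VERTICALS ++ pvLEGACY_VERTICALS).find?
      (fun v => PySem.Str.startswith verticale_lower v) with
  | some v => v
  | none => "altro"

-- ===== PRECONDITION & SPEC =====
def Spec_extract_vertical_key_impl_py (verticale_id : String) (out : String) : Prop := out = extract_vertical_key_impl_py_alt verticale_id
instance (verticale_id : String) (out : String) : Decidable (Spec_extract_vertical_key_impl_py verticale_id out) := by unfold Spec_extract_vertical_key_impl_py; infer_instance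

-- ===== CLAIM (what is proved, stated in full; the proofs are below) =====
def Claim_equal_extract_vertical_key_impl_py : Prop := ∀ (verticale_id : String), Dom_extract_vertical_key_impl_py verticale_id → Spec_extract_vertical_key_impl_py verticale_id (extract_vertical_key_impl_py verticale_id)

-- ===== LEMMAS AND PROOFS =====

-- No key of the combined list is a (string-)prefix of a different key.
theorem pv_nonprefix : ∀ v1 ∈ pvNEW_VERTICALS ++ pvLEGACY_VERTICALS,
    ∀ v2 ∈ pvNEW_VERTICALS ++ pvLEGACY_VERTICALS,
    v1.toList <+: v2.toList → v1 = v2 := by decide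

-- find? returns the unique satisfier when it is a member and every satisfier equals it.
theorem pv_find?_eq_some_of_unique {α : Type} (p : α → Bool) (a : α) :
    ∀ (l : List α), a ∈ l → p a = true → (∀ b ∈ l, p b = true → b = a) →
    l.find? p = some a := by
  intro l
  induction l with
  | nil => intro h; exact absurd h (List.not_mem_nil)
  | cons x xs ih =>
    intro hmem hpa huniq
    by_cases hx : p x = true
    · have : x = a := huniq x (List.mem_cons_self) hx
      subst this
      simp [List.find?, hpa]
    · have hxa : x ≠ a := fun h => hx (h ▸ hpa)
      have hmem' : a ∈ xs := by
        rcases List.mem_cons.mp hmem with h | h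
        · exact absurd h.symm hxa
        · exact h
      simp only [List.find?, hx]
      exact ih hmem' hpa (fun b hb => huniq b (List.mem_cons_of_mem x hb))

-- If v1 is a bare prefix of t and v2 followed by a separator char is a prefix of t,
-- with v1 v2 keys, then v1 = v2.
theorem pv_bare_sep (v1 v2 t : String) (c : Char)
    (h1m : v1 ∈ pvNEW_VERTICALS ++ pvLEGACY_VERTICALS)
    (h2m : v2 ∈ pvNEW_VERTICALS ++ pvLEGACY_VERTICALS)
    (h1 : v1.toList <+: t.toList)
    (h2 : v2.toList ++ [c] <+: t.toList) : v1 = v2 := by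
  rcases List.prefix_or_prefix_of_prefix h1 h2 with h | h
  · rcases List.prefix_concat_iff.mp h with h' | h'
    · -- v1 = v2 ++ [c]: then v2 <+: v1, so v1 = v2, length contradiction
      have hv2 : v2.toList <+: v1.toList := by
        rw [h']; exact List.prefix_append _ _
      have heq := pv_nonprefix v2 h2m v1 h1m hv2
      subst heq
      have := congrArg List.length h'
      simp at this
    · exact pv_nonprefix v1 h1m v2 h2m h'
  · have hv2 : v2.toList <+: v1.toList := (List.prefix_append _ _).trans h
    exact (pv_nonprefix v2 h2m v1 h1m hv2).symm

-- Str.startswith unfolded to list prefix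
theorem pv_sw_iff (t p : String) :
    PySem.Str.startswith t p = true ↔ p.toList <+: t.toList := by
  rw [PySem.Str.startswith_eq]; exact PySem.Chars.startswith_iff _ _

theorem pv_main (t : String) :
    (if (pvNEW_VERTICALS ++ pvLEGACY_VERTICALS).contains t then t
     else
       match (pvNEW_VERTICALS ++ pvLEGACY_VERTICALS).find?
           (fun v => PySem.Str.startswith t (v ++ "_")
                  || PySem.Str.startswith t (v ++ "-")) with
       | some v => v
       | none =>
         match (pvNEW_VERTICALS ++ pvLEGACY_VERTICALS).find?
             (fun v => PySem.Str.startswith t v) with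
         | some v => v
         | none => "altro")
    = (match (pvNEW_VERTICALS ++ pvLEGACY_VERTICALS).find?
          (fun v => PySem.Str.startswith t v) with
       | some v => v
       | none => "altro") := by
  by_cases hc : (pvNEW_VERTICALS ++ pvLEGACY_VERTICALS).contains t = true
  · -- exact match: the bare find? returns t itself
    have htm : t ∈ pvNEW_VERTICALS ++ pvLEGACY_VERTICALS := List.contains_iff_mem.mp hc
    have hfind : (pvNEW_VERTICALS ++ pvLEGACY_VERTICALS).find?
        (fun v => PySem.Str.startswith t v) = some t := by
      apply pv_find?_eq_some_of_unique _ _ _ htm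
      · exact (pv_sw_iff t t).mpr List.prefix_rfl
      · intro b hb hpb
        exact pv_nonprefix b hb t htm ((pv_sw_iff t b).mp hpb)
    rw [if_pos hc, hfind]
  · rw [if_neg hc]
    cases hsep : (pvNEW_VERTICALS ++ pvLEGACY_VERTICALS).find?
        (fun v => PySem.Str.startswith t (v ++ "_")
               || PySem.Str.startswith t (v ++ "-")) with
    | none => rfl
    | some v0 =>
      -- v0 has a separator-prefix match; show the bare find? also returns v0
      have hv0m := List.mem_of_find?_eq_some hsep
      have hv0p := List.find?_some hsep
      have hsepPre : v0.toList ++ ['_'] <+: t.toList ∨ v0.toList ++ ['-'] <+: t.toList := by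
        rcases Bool.or_eq_true_iff.mp hv0p with h | h
        · left
          have := (pv_sw_iff t (v0 ++ "_")).mp h
          simpa using this
        · right
          have := (pv_sw_iff t (v0 ++ "-")).mp h
          simpa using this
      have hbare : v0.toList <+: t.toList := by
        rcases hsepPre with h | h
        · exact (List.prefix_append _ _).trans h
        · exact (List.prefix_append _ _).trans h
      have hfind : (pvNEW_VERTICALS ++ pvLEGACY_VERTICALS).find?
          (fun v => PySem.Str.startswith t v) = some v0 := by
        apply pv_find?_eq_some_of_unique _ _ _ hv0m
        · exact (pv_sw_iff t v0).mpr hbare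
        · intro b hb hpb
          rcases hsepPre with h | h
          · exact pv_bare_sep b v0 t '_' hb hv0m ((pv_sw_iff t b).mp hpb) h
          · exact pv_bare_sep b v0 t '-' hb hv0m ((pv_sw_iff t b).mp hpb) h
      rw [hfind]

-- ===== VERDICT (by name: the statement is the Claim_ definition above) =====
theorem extract_vertical_key_impl_py_spec : Claim_equal_extract_vertical_key_impl_py := by
  intro verticale_id _
  unfold Spec_extract_vertical_key_impl_py
  unfold extract_vertical_key_impl_py extract_vertical_key_impl_py_alt
  exact pv_main (PySem.Str.strip (PySem.Str.lower verticale_id))
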